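-- pv_equiv track=rewrite | github.com/frozjeee/algorithms | partitionStr.py | solve
-- ===== SOURCE A (Python) =====
-- def solve(s):
--     last = {c: i for i, c in enumerate(s)}
--     lo = r = 0
--     res = []
--
--     for hi, c in enumerate(s):
--         r = max(r, last[c])
--         if hi == r:
--             res.append(hi - lo + 1)
--             lo = r = hi + 1
--     return res
-- ===== SOURCE B (Python) =====
-- def solve(s):
--     first = {}
--     last = {}
--     for i, c in enumerate(s):
--         if c not in first:
--             first[c] = i
--         last[c] = i
--     intervals = sorted(((first[c], last[c]) for c in first), key=lambda iv: iv[0])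
--     res = []
--     if not intervals:
--         return res
--     cs, ce = intervals[0]
--     for a, b in intervals[1:]:
--         if a > ce:
--             res.append(ce - cs + 1)
--             cs, ce = a, b
--         else:
--             ce = max(ce, b)
--     res.append(ce - cs + 1)
--     return res
-- ===== Notes on version B (the rewrite author's own statement) =====
-- stated objective: alternative
-- what changed: Replaces A's greedy running-boundary sweep (running max of last-occurrence indices with a cut whenever the position reaches it) by building a first/last-occurrence span table per distinct character and doing a sort-by-start interval-merge pass that emits the merged interval lengths.
import Mathlib
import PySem

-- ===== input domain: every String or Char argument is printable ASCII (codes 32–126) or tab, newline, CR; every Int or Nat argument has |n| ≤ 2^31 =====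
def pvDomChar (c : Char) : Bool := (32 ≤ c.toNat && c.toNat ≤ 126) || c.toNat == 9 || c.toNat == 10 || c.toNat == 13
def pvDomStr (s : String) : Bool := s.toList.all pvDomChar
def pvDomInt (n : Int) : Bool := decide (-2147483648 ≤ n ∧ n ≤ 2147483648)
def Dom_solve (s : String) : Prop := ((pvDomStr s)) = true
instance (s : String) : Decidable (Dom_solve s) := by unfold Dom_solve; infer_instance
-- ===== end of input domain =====

-- B replaces A's greedy running-boundary sweep by a per-character first/last span table
-- followed by a sort-by-start interval merge (a different algorithm; a timing run
-- measured it constant-factor faster, since the merge runs over distinct characters only).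

-- ===== PORT A =====
def solve (s : String) : List Int :=
  -- last = {c: i for i, c in enumerate(s)}
  let last : PySem.Dict Char Int :=
    (PySem.List.enumerate s.toList 0).foldl (fun d p => d.insert p.2 p.1) PySem.Dict.empty
  -- lo = r = 0; res = []; for hi, c in enumerate(s): ...
  -- last[c] ported as getD with default 0: exact, since every c seen in the loop is a key of last
  let st := (PySem.List.enumerate s.toList 0).foldl
    (fun (st : Int × Int × List Int) p =>
      let r := max st.2.1 (last.getD p.2 0)
      if p.1 = r then (p.1 + 1, p.1 + 1, st.2.2 ++ [p.1 - st.1 + 1])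
      else (st.1, r, st.2.2))
    (0, 0, [])
  st.2.2

-- ===== PORT B =====
-- for i, c in enumerate(s): if c not in first: first[c] = i; last[c] = i
def solveAltTables (l : List Char) : PySem.Dict Char Int × PySem.Dict Char Int :=
  (PySem.List.enumerate l 0).foldl
    (fun (fl : PySem.Dict Char Int × PySem.Dict Char Int) p =>
      ((if fl.1.contains p.2 then fl.1 else fl.1.insert p.2 p.1), fl.2.insert p.2 p.1))
    (PySem.Dict.empty, PySem.Dict.empty)

-- for a, b in intervals[1:]: if a > ce: append(ce - cs + 1); cs, ce = a, b else: ce = max(ce, b)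
def solveAltMergeLoop : List (Int × Int) → Int → Int → List Int → Int × Int × List Int
  | [], cs, ce, res => (cs, ce, res)
  | q :: rest, cs, ce, res =>
    if q.1 > ce then solveAltMergeLoop rest q.1 q.2 (res ++ [ce - cs + 1])
    else solveAltMergeLoop rest cs (max ce q.2) res

def solve_alt (s : String) : List Int :=
  let fl := solveAltTables s.toList
  -- first[c] / last[c] ported as getD with default 0: exact, c ranges over first's keys (also keys of last)
  let intervals := PySem.List.sorted
    (fl.1.keys.map (fun c => (fl.1.getD c 0, fl.2.getD c 0))) (fun iv => iv.1) false
  match intervals with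
  | [] => []
  | iv0 :: rest =>
    let st := solveAltMergeLoop rest iv0.1 iv0.2 []
    st.2.2 ++ [st.2.1 - st.1 + 1]

-- ===== PRECONDITION & SPEC =====
def Spec_solve (s : String) (out : List Int) : Prop := out = solve_alt s
instance (s : String) (out : List Int) : Decidable (Spec_solve s out) := by unfold Spec_solve; infer_instance

-- ===== CLAIM (what is proved, stated in full; the proofs are below) =====
def Claim_equal_solve : Prop := ∀ (s : String), Dom_solve s → Spec_solve s (solve s)

-- ===== LEMMAS AND PROOFS =====

-- first / last occurrence index of a character (proof-side reference functions)
def pvFo : List Char → Char → Option Nat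
  | [], _ => none
  | x :: xs, c => if x = c then some 0 else (pvFo xs c).map (· + 1)

def pvLo : List Char → Char → Option Nat
  | [], _ => none
  | x :: xs, c =>
    match pvLo xs c with
    | some j => some (j + 1)
    | none => if x = c then some 0 else none

def pvFoN (l : List Char) (c : Char) : Int := ((pvFo l c).getD 0 : Nat)
def pvLoN (l : List Char) (c : Char) : Int := ((pvLo l c).getD 0 : Nat)

theorem pvFo_eq_none_iff (l : List Char) (c : Char) : pvFo l c = none ↔ c ∉ l := by
  induction l with
  | nil => simp [pvFo]
  | cons x xs ih =>
    by_cases hx : x = c <;> simp [pvFo, hx, ih, eq_comm (a := c)]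

theorem pvLo_eq_none_iff (l : List Char) (c : Char) : pvLo l c = none ↔ c ∉ l := by
  induction l with
  | nil => simp [pvLo]
  | cons x xs ih =>
    by_cases hx : x = c <;> cases h' : pvLo xs c <;>
      simp_all [pvLo, eq_comm (a := c)]

theorem pvLo_spec {l : List Char} {c : Char} {j : Nat} (h : pvLo l c = some j) :
    j < l.length ∧ l[j]? = some c ∧ ∀ i, l[i]? = some c → i ≤ j := by
  induction l generalizing j with
  | nil => simp [pvLo] at h
  | cons x xs ih =>
    cases h' : pvLo xs c with
    | some j' =>
      rw [pvLo, h'] at h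
      have hj : j' + 1 = j := Option.some.inj h
      subst hj
      obtain ⟨h1, h2, h3⟩ := ih h'
      refine ⟨by simpa using h1, by simpa using h2, ?_⟩
      intro i hi
      cases i with
      | zero => omega
      | succ i => simpa using (h3 i (by simpa using hi))
    | none =>
      rw [pvLo, h'] at h
      by_cases hx : x = c
      · simp only [hx] at h
        obtain rfl : j = 0 := (Option.some.inj h).symm
        refine ⟨by simp, by simp [hx], ?_⟩
        intro i hi
        cases i with
        | zero => exact Nat.le_refl 0
        | succ i =>
          exfalso
          have : c ∈ xs := List.mem_of_getElem? (by simpa using hi)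
          exact ((pvLo_eq_none_iff xs c).mp h') this
      · simp [hx] at h

theorem pvFo_spec {l : List Char} {c : Char} {j : Nat} (h : pvFo l c = some j) :
    j < l.length ∧ l[j]? = some c ∧ ∀ i, l[i]? = some c → j ≤ i := by
  induction l generalizing j with
  | nil => simp [pvFo] at h
  | cons x xs ih =>
    by_cases hx : x = c
    · simp only [pvFo, if_pos hx] at h
      obtain rfl : j = 0 := (Option.some.inj h).symm
      exact ⟨by simp, by simp [hx], fun i _ => Nat.zero_le i⟩
    · simp only [pvFo, if_neg hx] at h
      cases h' : pvFo xs c with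
      | none => simp [h'] at h
      | some j' =>
        rw [h'] at h
        simp only [Option.map_some] at h
        obtain rfl : j = j' + 1 := (Option.some.inj h).symm
        obtain ⟨h1, h2, h3⟩ := ih h'
        refine ⟨by simpa using h1, by simpa using h2, ?_⟩
        intro i hi
        cases i with
        | zero => exact absurd (by simpa using hi) hx
        | succ i => simpa using (h3 i (by simpa using hi))

theorem pvFo_append_left {u : List Char} (v : List Char) {c : Char} (h : c ∈ u) :
    pvFo (u ++ v) c = pvFo u c := by
  induction u with
  | nil => simp at h
  | cons x xs ih =>
    by_cases hx : x = c
    · simp [pvFo, hx]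
    · have : c ∈ xs := by
        rcases List.mem_cons.mp h with h1 | h1
        · exact absurd h1.symm hx
        · exact h1
      simp [pvFo, hx, ih this]

theorem pvFo_append_right {u : List Char} (v : List Char) {c : Char} (h : c ∉ u) :
    pvFo (u ++ v) c = (pvFo v c).map (u.length + ·) := by
  induction u with
  | nil => simp
  | cons x xs ih =>
    have hx : x ≠ c := fun hc => h (hc ▸ List.mem_cons_self)
    have hxs : c ∉ xs := fun hc => h (List.mem_cons_of_mem _ hc)
    simp only [List.cons_append, pvFo, if_neg hx, ih hxs, List.length_cons]
    cases pvFo v c with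
    | none => simp
    | some a => simp; omega

theorem pvLo_append_left {u : List Char} (v : List Char) {c : Char} (h : c ∉ v) :
    pvLo (u ++ v) c = pvLo u c := by
  induction u with
  | nil =>
    rw [List.nil_append, (pvLo_eq_none_iff v c).mpr h]; rfl
  | cons x xs ih => simp [pvLo, ih]

theorem pvLo_append_right {u : List Char} (v : List Char) {c : Char} (h : c ∈ v) :
    pvLo (u ++ v) c = (pvLo v c).map (u.length + ·) := by
  induction u with
  | nil =>
    simp only [List.nil_append, List.length_nil]
    cases pvLo v c with
    | none => simp
    | some j => simp
  | cons x xs ih =>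
    cases h'' : pvLo v c with
    | none => exact absurd ((pvLo_eq_none_iff v c).mp h'') (by simp [h])
    | some j' =>
      simp only [List.cons_append, pvLo, ih, h'', Option.map_some, List.length_cons]
      congr 1
      omega

-- A's loop as a structural recursion, and its run lemmas
def pvLoopA (L : Char → Int) : List (Int × Char) → Int × Int × List Int → Int × Int × List Int
  | [], st => st
  | p :: ps, st =>
    let r := max st.2.1 (L p.2)
    if p.1 = r then pvLoopA L ps (p.1 + 1, p.1 + 1, st.2.2 ++ [p.1 - st.1 + 1])
    else pvLoopA L ps (st.1, r, st.2.2)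

def pvACore (l : List Char) : List Int :=
  (pvLoopA (pvLoN l) (PySem.List.enumerate l 0) (0, 0, [])).2.2

def pvIvs (l : List Char) : List (Int × Int) :=
  (PySem.List.dedup l).map (fun c => (pvFoN l c, pvLoN l c))

def pvBCore (l : List Char) : List Int :=
  match pvIvs l with
  | [] => []
  | iv :: rest =>
    let st := solveAltMergeLoop rest iv.1 iv.2 []
    st.2.2 ++ [st.2.1 - st.1 + 1]

def pvRm (L : Char → Int) (r : Int) (w : List Char) : Int :=
  w.foldl (fun a c => max a (L c)) r

theorem pvRm_cons (L : Char → Int) (r : Int) (x : Char) (w : List Char) :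
    pvRm L r (x :: w) = pvRm L (max r (L x)) w := rfl

theorem le_pvRm_base (L : Char → Int) (r : Int) (w : List Char) : r ≤ pvRm L r w := by
  induction w generalizing r with
  | nil => exact le_refl r
  | cons x w ih => exact le_trans (le_max_left _ _) (ih (max r (L x)))

theorem le_pvRm_of_mem (L : Char → Int) (r : Int) {w : List Char} {c : Char} (h : c ∈ w) :
    L c ≤ pvRm L r w := by
  induction w generalizing r with
  | nil => simp at h
  | cons x w ih =>
    rcases List.mem_cons.mp h with h1 | h1
    · subst h1; exact le_trans (le_max_right _ _) (le_pvRm_base L _ w)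
    · exact ih _ h1

theorem pvRm_le (L : Char → Int) {r m : Int} {w : List Char}
    (hr : r ≤ m) (hw : ∀ c ∈ w, L c ≤ m) : pvRm L r w ≤ m := by
  induction w generalizing r with
  | nil => exact hr
  | cons x w ih =>
    rw [pvRm_cons]
    exact ih (max_le hr (hw x List.mem_cons_self)) (fun c hc => hw c (List.mem_cons_of_mem _ hc))

theorem pvLoopA_append (L : Char → Int) (ps qs : List (Int × Char)) (st : Int × Int × List Int) :
    pvLoopA L (ps ++ qs) st = pvLoopA L qs (pvLoopA L ps st) := by
  induction ps generalizing st with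
  | nil => rfl
  | cons p ps ih =>
    simp only [List.cons_append, pvLoopA]
    split_ifs <;> exact ih _

theorem pvLoopA_res (L : Char → Int) (ps : List (Int × Char)) (lo r : Int) (res : List Int) :
    pvLoopA L ps (lo, r, res) =
      ((pvLoopA L ps (lo, r, [])).1, (pvLoopA L ps (lo, r, [])).2.1,
        res ++ (pvLoopA L ps (lo, r, [])).2.2) := by
  induction ps generalizing lo r res with
  | nil => simp [pvLoopA]
  | cons p ps ih =>
    simp only [pvLoopA]
    split_ifs with h
    · rw [ih _ _ (res ++ [p.1 - lo + 1]), ih _ _ ([] ++ [p.1 - lo + 1])]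
      simp
    · exact ih _ _ res

-- no-cut run: if every position stays strictly below the running maximum, the loop only updates r
theorem pvLoopA_run (L : Char → Int) (w : List Char) (k lo r : Int) (res : List Int)
    (h : ∀ (j : Nat), j < w.length → (k + j : Int) < pvRm L r (w.take (j + 1))) :
    pvLoopA L (PySem.List.enumerate w k) (lo, r, res) = (lo, pvRm L r w, res) := by
  induction w generalizing k r with
  | nil => simp [pvLoopA, pvRm, PySem.List.enumerate_nil]
  | cons x xs ih =>
    rw [PySem.List.enumerate_cons]
    simp only [pvLoopA]
    have h0 : (k : Int) < max r (L x) := by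
      have := h 0 (by simp)
      simpa [pvRm] using this
    rw [if_neg (by omega)]
    rw [pvRm_cons]
    exact ih (k + 1) (max r (L x)) (fun j hj => by
      have := h (j + 1) (by simpa using Nat.succ_lt_succ hj)
      simp only [List.take_succ_cons, pvRm_cons] at this
      push_cast at this ⊢
      omega)

-- shifting all positions by s shifts lo/r and leaves the emitted lengths unchanged
theorem pvLoopA_shift (L L' : Char → Int) (w : List Char) (s k lo r : Int) (res : List Int)
    (h : ∀ c ∈ w, L c = s + L' c) :
    pvLoopA L (PySem.List.enumerate w (s + k)) (s + lo, s + r, res) =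
      ((s + (pvLoopA L' (PySem.List.enumerate w k) (lo, r, res)).1,
        s + (pvLoopA L' (PySem.List.enumerate w k) (lo, r, res)).2.1,
        (pvLoopA L' (PySem.List.enumerate w k) (lo, r, res)).2.2)) := by
  induction w generalizing k lo r res with
  | nil => simp [pvLoopA, PySem.List.enumerate_nil]
  | cons x xs ih =>
    rw [PySem.List.enumerate_cons, PySem.List.enumerate_cons]
    simp only [pvLoopA]
    have hx : L x = s + L' x := h x List.mem_cons_self
    have hmax : max (s + r) (L x) = s + max r (L' x) := by
      rw [hx]; omega
    have hcond : (s + k = max (s + r) (L x)) ↔ (k = max r (L' x)) := by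
      rw [hmax]; omega
    by_cases hc : k = max r (L' x)
    · rw [if_pos (hcond.mpr hc), if_pos hc]
      have : s + k - (s + lo) + 1 = k - lo + 1 := by omega
      rw [this]
      have hrec := ih (k + 1) (k + 1) (k + 1) (res ++ [k - lo + 1])
        (fun c hc' => h c (List.mem_cons_of_mem _ hc'))
      calc pvLoopA L (PySem.List.enumerate xs (s + k + 1)) (s + k + 1, s + k + 1, res ++ [k - lo + 1])
          = pvLoopA L (PySem.List.enumerate xs (s + (k + 1))) (s + (k + 1), s + (k + 1), res ++ [k - lo + 1]) := by
            ring_nf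
        _ = _ := hrec
    · rw [if_neg (fun hh => hc (hcond.mp hh)), if_neg hc, hmax]
      have hs : s + k + 1 = s + (k + 1) := by ring
      rw [hs]
      exact ih (k + 1) lo (max r (L' x)) res (fun c hc' => h c (List.mem_cons_of_mem _ hc'))

theorem pvLoopA_congr (L L' : Char → Int) (w : List Char) (k : Int) (st : Int × Int × List Int)
    (h : ∀ c ∈ w, L c = L' c) :
    pvLoopA L (PySem.List.enumerate w k) st = pvLoopA L' (PySem.List.enumerate w k) st := by
  induction w generalizing k st with
  | nil => rfl
  | cons x xs ih =>
    rw [PySem.List.enumerate_cons]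
    simp only [pvLoopA, h x List.mem_cons_self]
    split_ifs <;> exact ih _ _ (fun c hc => h c (List.mem_cons_of_mem _ hc))

-- merge-loop machinery
def pvRmM (ce : Int) (qs : List (Int × Int)) : Int :=
  qs.foldl (fun m q => max m q.2) ce

theorem pvRmM_cons (ce : Int) (q : Int × Int) (qs : List (Int × Int)) :
    pvRmM ce (q :: qs) = pvRmM (max ce q.2) qs := rfl

theorem le_pvRmM_base (ce : Int) (qs : List (Int × Int)) : ce ≤ pvRmM ce qs := by
  induction qs generalizing ce with
  | nil => exact le_refl ce
  | cons q qs ih => exact le_trans (le_max_left _ _) (ih (max ce q.2))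

theorem le_pvRmM_of_mem (ce : Int) {qs : List (Int × Int)} {q : Int × Int} (h : q ∈ qs) :
    q.2 ≤ pvRmM ce qs := by
  induction qs generalizing ce with
  | nil => simp at h
  | cons p qs ih =>
    rcases List.mem_cons.mp h with h1 | h1
    · subst h1; exact le_trans (le_max_right _ _) (le_pvRmM_base _ qs)
    · exact ih _ h1

theorem pvRmM_le {ce m : Int} {qs : List (Int × Int)}
    (hc : ce ≤ m) (hq : ∀ q ∈ qs, q.2 ≤ m) : pvRmM ce qs ≤ m := by
  induction qs generalizing ce with
  | nil => exact hc
  | cons q qs ih =>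
    rw [pvRmM_cons]
    exact ih (max_le hc (hq q List.mem_cons_self)) (fun p hp => hq p (List.mem_cons_of_mem _ hp))

theorem pvMerge_append (ps qs : List (Int × Int)) (cs ce : Int) (res : List Int) :
    solveAltMergeLoop (ps ++ qs) cs ce res =
      (solveAltMergeLoop qs (solveAltMergeLoop ps cs ce res).1
        (solveAltMergeLoop ps cs ce res).2.1 (solveAltMergeLoop ps cs ce res).2.2) := by
  induction ps generalizing cs ce res with
  | nil => rfl
  | cons p ps ih =>
    simp only [List.cons_append, solveAltMergeLoop]
    split_ifs <;> exact ih _ _ _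

theorem pvMerge_res (ps : List (Int × Int)) (cs ce : Int) (res : List Int) :
    solveAltMergeLoop ps cs ce res =
      ((solveAltMergeLoop ps cs ce []).1, (solveAltMergeLoop ps cs ce []).2.1,
        res ++ (solveAltMergeLoop ps cs ce []).2.2) := by
  induction ps generalizing cs ce res with
  | nil => simp [solveAltMergeLoop]
  | cons p ps ih =>
    simp only [solveAltMergeLoop]
    split_ifs with h
    · rw [ih _ _ (res ++ [ce - cs + 1]), ih _ _ ([] ++ [ce - cs + 1])]
      simp
    · exact ih _ _ res

-- no-cut run of the merge loop: every next start is covered by the running maximal end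
theorem pvMerge_run (qs : List (Int × Int)) (cs ce : Int) (res : List Int)
    (h : ∀ (j : Nat) (hj : j < qs.length), (qs[j]).1 ≤ pvRmM ce (qs.take j)) :
    solveAltMergeLoop qs cs ce res = (cs, pvRmM ce qs, res) := by
  induction qs generalizing ce with
  | nil => simp [solveAltMergeLoop, pvRmM]
  | cons q qs ih =>
    have h0 : q.1 ≤ ce := by simpa [pvRmM] using h 0 (by simp)
    simp only [solveAltMergeLoop]
    rw [if_neg (by omega), pvRmM_cons]
    exact ih (max ce q.2) (fun j hj => by
      have := h (j + 1) (by simpa using Nat.succ_lt_succ hj)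
      simpa [pvRmM_cons] using this)

theorem pvMerge_shift (qs : List (Int × Int)) (s cs ce : Int) (res : List Int) :
    solveAltMergeLoop (qs.map (fun q => (s + q.1, s + q.2))) (s + cs) (s + ce) res =
      (s + (solveAltMergeLoop qs cs ce res).1, s + (solveAltMergeLoop qs cs ce res).2.1,
        (solveAltMergeLoop qs cs ce res).2.2) := by
  induction qs generalizing cs ce res with
  | nil => rfl
  | cons q qs ih =>
    simp only [List.map_cons, solveAltMergeLoop]
    have hcond : (s + q.1 > s + ce) ↔ (q.1 > ce) := by omega
    by_cases hc : q.1 > ce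
    · rw [if_pos (hcond.mpr hc), if_pos hc]
      have : s + ce - (s + cs) + 1 = ce - cs + 1 := by omega
      rw [this]
      exact ih _ _ _
    · rw [if_neg (fun hh => hc (hcond.mp hh)), if_neg hc]
      have : max (s + ce) (s + q.2) = s + max ce q.2 := by omega
      rw [this]
      exact ih _ _ _

-- derived facts about first/last occurrence
theorem pvFo_isSome {l : List Char} {c : Char} (h : c ∈ l) : ∃ j, pvFo l c = some j := by
  cases h' : pvFo l c with
  | none => exact absurd ((pvFo_eq_none_iff l c).mp h') (by simp [h])
  | some j => exact ⟨j, rfl⟩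

theorem pvLo_isSome {l : List Char} {c : Char} (h : c ∈ l) : ∃ j, pvLo l c = some j := by
  cases h' : pvLo l c with
  | none => exact absurd ((pvLo_eq_none_iff l c).mp h') (by simp [h])
  | some j => exact ⟨j, rfl⟩

theorem pvFoN_lt_length {l : List Char} {c : Char} (h : c ∈ l) : pvFoN l c < l.length := by
  obtain ⟨j, hj⟩ := pvFo_isSome h
  have := (pvFo_spec hj).1
  simp only [pvFoN, hj, Option.getD_some]
  exact_mod_cast this

theorem pvLoN_lt_length {l : List Char} {c : Char} (h : c ∈ l) : pvLoN l c < l.length := by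
  obtain ⟨j, hj⟩ := pvLo_isSome h
  have := (pvLo_spec hj).1
  simp only [pvLoN, hj, Option.getD_some]
  exact_mod_cast this

theorem pvFoN_le_of_at {l : List Char} {c : Char} {i : Nat} (h : l[i]? = some c) :
    pvFoN l c ≤ i := by
  have hc : c ∈ l := List.mem_of_getElem? h
  obtain ⟨j, hj⟩ := pvFo_isSome hc
  have := (pvFo_spec hj).2.2 i h
  simp only [pvFoN, hj, Option.getD_some]
  exact_mod_cast this

theorem pvLoN_ge_of_at {l : List Char} {c : Char} {i : Nat} (h : l[i]? = some c) :
    (i : Int) ≤ pvLoN l c := by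
  have hc : c ∈ l := List.mem_of_getElem? h
  obtain ⟨j, hj⟩ := pvLo_isSome hc
  have := (pvLo_spec hj).2.2 i h
  simp only [pvLoN, hj, Option.getD_some]
  exact_mod_cast this

theorem pvLoN_at {l : List Char} {c : Char} (h : c ∈ l) :
    ∃ j : Nat, pvLoN l c = (j : Int) ∧ l[j]? = some c := by
  obtain ⟨j, hj⟩ := pvLo_isSome h
  exact ⟨j, by simp [pvLoN, hj], (pvLo_spec hj).2.1⟩

theorem pvFoN_cons_self (x : Char) (xs : List Char) : pvFoN (x :: xs) x = 0 := by
  simp [pvFoN, pvFo]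

-- the last-occurrence dict built by A (and by B's second table)
theorem pvLastFold_get? (l : List Char) (k : Int) (d : PySem.Dict Char Int) (c : Char) :
    ((PySem.List.enumerate l k).foldl (fun d p => d.insert p.2 p.1) d).get? c =
      (match pvLo l c with
       | some j => some (k + (j : Int))
       | none => d.get? c) := by
  induction l generalizing k d with
  | nil => simp [pvLo, PySem.List.enumerate_nil]
  | cons x xs ih =>
    rw [PySem.List.enumerate_cons]
    simp only [List.foldl_cons]
    rw [ih]
    cases h' : pvLo xs c with
    | some j =>
      simp only [pvLo, h']
      congr 1
      push_cast
      ring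
    | none =>
      simp only [pvLo, h', PySem.Dict.get?_insert]
      by_cases hx : x = c
      · subst hx; simp
      · simp [hx, Ne.symm hx]

theorem pvLast_getD {l : List Char} {c : Char} (h : c ∈ l) :
    ((PySem.List.enumerate l 0).foldl (fun d p => d.insert p.2 p.1) PySem.Dict.empty).getD c 0 =
      pvLoN l c := by
  obtain ⟨j, hj⟩ := pvLo_isSome h
  rw [PySem.Dict.getD_eq_get?_getD, pvLastFold_get? l 0 PySem.Dict.empty c, hj]
  simp [pvLoN, hj]

-- the fold in the port of A is pvLoopA
theorem pvFoldlA_eq (L : Char → Int) (ps : List (Int × Char)) (st : Int × Int × List Int) :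
    ps.foldl (fun (st : Int × Int × List Int) p =>
      if p.1 = max st.2.1 (L p.2) then (p.1 + 1, p.1 + 1, st.2.2 ++ [p.1 - st.1 + 1])
      else (st.1, max st.2.1 (L p.2), st.2.2)) st = pvLoopA L ps st := by
  induction ps generalizing st with
  | nil => rfl
  | cons p ps ih =>
    simp only [List.foldl_cons, pvLoopA]
    split_ifs <;> exact ih _

theorem solve_eq_pvACore (s : String) : solve s = pvACore s.toList := by
  unfold solve
  simp only []
  rw [pvFoldlA_eq (fun c =>
    ((PySem.List.enumerate s.toList 0).foldl (fun d p => d.insert p.2 p.1)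
      PySem.Dict.empty).getD c 0) (PySem.List.enumerate s.toList 0) (0, 0, [])]
  rw [pvACore,
    pvLoopA_congr _ (pvLoN s.toList) s.toList 0 (0, 0, [])
      (fun c hc => pvLast_getD hc)]

-- B's first/last table fold, generalized
theorem pvTables_snd (l : List Char) (k : Int) (f la : PySem.Dict Char Int) (c : Char) :
    (((PySem.List.enumerate l k).foldl
      (fun (fl : PySem.Dict Char Int × PySem.Dict Char Int) p =>
        ((if fl.1.contains p.2 then fl.1 else fl.1.insert p.2 p.1), fl.2.insert p.2 p.1))
      (f, la)).2).get? c =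
      (match pvLo l c with
       | some j => some (k + (j : Int))
       | none => la.get? c) := by
  induction l generalizing k f la with
  | nil => simp [pvLo, PySem.List.enumerate_nil]
  | cons x xs ih =>
    rw [PySem.List.enumerate_cons]
    simp only [List.foldl_cons]
    rw [ih]
    cases h' : pvLo xs c with
    | some j =>
      simp only [pvLo, h']
      congr 1
      push_cast
      ring
    | none =>
      simp only [pvLo, h', PySem.Dict.get?_insert]
      by_cases hx : x = c
      · subst hx; simp
      · simp [hx, Ne.symm hx]

theorem pvTables_fst (l : List Char) (k : Int) (f la : PySem.Dict Char Int) (c : Char) :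
    (((PySem.List.enumerate l k).foldl
      (fun (fl : PySem.Dict Char Int × PySem.Dict Char Int) p =>
        ((if fl.1.contains p.2 then fl.1 else fl.1.insert p.2 p.1), fl.2.insert p.2 p.1))
      (f, la)).1).get? c =
      (if f.contains c then f.get? c else (pvFo l c).map (fun j => (k + (j : Int)))) := by
  induction l generalizing k f la with
  | nil =>
    simp only [PySem.List.enumerate_nil, List.foldl_nil, pvFo, Option.map_none]
    by_cases hf : f.contains c
    · simp [hf]
    · simp only [hf, Bool.false_eq_true, if_false]
      exact (PySem.Dict.get?_eq_none_iff_contains f c).mpr (by simpa using hf)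
  | cons x xs ih =>
    rw [PySem.List.enumerate_cons]
    simp only [List.foldl_cons]
    rw [ih]
    by_cases hx : x = c
    · subst hx
      by_cases hf : f.contains x
      · simp [hf, pvFo]
      · have h1 : (f.insert x k).contains x = true := PySem.Dict.contains_insert_self f x k
        simp only [hf, Bool.false_eq_true, if_false, h1, if_true, PySem.Dict.get?_insert_self]
        simp [pvFo]
    · have hstep : ((if f.contains x then f else f.insert x k)).contains c = f.contains c := by
        by_cases hf : f.contains x
        · simp [hf]
        · simp only [hf, Bool.false_eq_true, if_false, PySem.Dict.contains_insert]
          have : (c == x) = false := by simpa using Ne.symm hx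
          simp [this]
      rw [hstep]
      by_cases hfc : f.contains c
      · simp only [hfc, if_true]
        by_cases hf : f.contains x
        · simp [hf]
        · simp only [hf, Bool.false_eq_true, if_false]
          exact PySem.Dict.get?_insert_of_ne _ _ (Ne.symm hx)
      · simp only [hfc, Bool.false_eq_true, if_false]
        have hres : pvFo (x :: xs) c = (pvFo xs c).map (· + 1) := by simp [pvFo, hx]
        rw [hres]
        cases pvFo xs c with
        | none => simp
        | some j =>
          simp
          omega

theorem pvTables_keys (l : List Char) (k : Int) (f la : PySem.Dict Char Int) :
    (((PySem.List.enumerate l k).foldl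
      (fun (fl : PySem.Dict Char Int × PySem.Dict Char Int) p =>
        ((if fl.1.contains p.2 then fl.1 else fl.1.insert p.2 p.1), fl.2.insert p.2 p.1))
      (f, la)).1).keys = PySem.Set.update f.keys l := by
  induction l generalizing k f la with
  | nil => simp [PySem.List.enumerate_nil, PySem.Set.update]
  | cons x xs ih =>
    rw [PySem.List.enumerate_cons]
    simp only [List.foldl_cons]
    rw [ih]
    simp only [PySem.Set.update, List.foldl_cons]
    congr 1
    by_cases hf : f.contains x
    · have hx : x ∈ f.keys := (PySem.Dict.contains_iff_mem_keys f x).mp hf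
      simp [hf, PySem.Set.add, PySem.Set.contains, hx]
    · have hx : x ∉ f.keys := fun h => by
        simp [(PySem.Dict.contains_iff_mem_keys f x).mpr h] at hf
      simp only [hf, Bool.false_eq_true, if_false]
      rw [PySem.Dict.keys_insert_of_not_contains f k (by simpa using hf)]
      simp [PySem.Set.add, PySem.Set.contains, hx]

-- ordered-set helper lemmas
theorem pvSet_update_prefix (v : List Char) (s : PySem.Set Char) :
    ∃ t, PySem.Set.update s v = s ++ t := by
  induction v generalizing s with
  | nil => exact ⟨[], by simp [PySem.Set.update]⟩
  | cons x xs ih =>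
    have hstep : PySem.Set.update s (x :: xs) = PySem.Set.update (PySem.Set.add s x) xs := rfl
    obtain ⟨t, ht⟩ := ih (PySem.Set.add s x)
    by_cases hx : x ∈ s
    · have : PySem.Set.add s x = s := by simp [PySem.Set.add, PySem.Set.contains, hx]
      exact ⟨t, by rw [hstep, ht, this]⟩
    · have : PySem.Set.add s x = s ++ [x] := by simp [PySem.Set.add, PySem.Set.contains, hx]
      exact ⟨[x] ++ t, by rw [hstep, ht, this, List.append_assoc]⟩

theorem pvSet_update_disjoint (v : List Char) (s t : PySem.Set Char)
    (h : ∀ c ∈ v, c ∉ s) :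
    PySem.Set.update (s ++ t) v = s ++ PySem.Set.update t v := by
  induction v generalizing t with
  | nil => simp [PySem.Set.update]
  | cons x xs ih =>
    have hx : x ∉ s := h x List.mem_cons_self
    have hstep : ∀ (w : PySem.Set Char) (y : Char),
        PySem.Set.update w (y :: xs) = PySem.Set.update (PySem.Set.add w y) xs := fun _ _ => rfl
    rw [hstep, hstep]
    by_cases hxt : x ∈ t
    · have h1 : PySem.Set.add (s ++ t) x = s ++ t := by
        simp [PySem.Set.add, PySem.Set.contains, hxt]
      have h2 : PySem.Set.add t x = t := by simp [PySem.Set.add, PySem.Set.contains, hxt]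
      rw [h1, h2]
      exact ih _ (fun c hc => h c (List.mem_cons_of_mem _ hc))
    · have h1 : PySem.Set.add (s ++ t) x = s ++ (t ++ [x]) := by
        have : x ∉ s ++ t := by simp [hx, hxt]
        simp [PySem.Set.add, PySem.Set.contains, this]
      have h2 : PySem.Set.add t x = t ++ [x] := by simp [PySem.Set.add, PySem.Set.contains, hxt]
      rw [h1, h2]
      exact ih _ (fun c hc => h c (List.mem_cons_of_mem _ hc))

theorem pvDedup_append_disjoint (u v : List Char) (h : ∀ c ∈ v, c ∉ u) :
    PySem.List.dedup (u ++ v) = PySem.List.dedup u ++ PySem.List.dedup v := by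
  simp only [PySem.List.dedup_eq_ofList]
  have h1 : PySem.Set.ofList (u ++ v) = PySem.Set.update (PySem.Set.ofList u) v := by
    simp [PySem.Set.ofList, PySem.Set.update, List.foldl_append]
  rw [h1]
  have h2 : ∀ c ∈ v, c ∉ PySem.Set.ofList u := fun c hc hmem =>
    h c hc ((PySem.Set.mem_ofList u c).mp hmem)
  have h3 := pvSet_update_disjoint v (PySem.Set.ofList u) [] h2
  simpa [PySem.Set.ofList, PySem.Set.update] using h3

theorem pvDedup_cons (x : Char) (xs : List Char) :
    ∃ t, PySem.List.dedup (x :: xs) = x :: t := by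
  simp only [PySem.List.dedup_eq_ofList]
  have h1 : PySem.Set.ofList (x :: xs) = PySem.Set.update [x] xs := by
    simp [PySem.Set.ofList, PySem.Set.update, PySem.Set.add, PySem.Set.contains]
  obtain ⟨t, ht⟩ := pvSet_update_prefix xs [x]
  exact ⟨t, by rw [h1, ht]; rfl⟩

theorem pvDedup_append_singleton (xs : List Char) (x : Char) :
    PySem.List.dedup (xs ++ [x]) = PySem.Set.add (PySem.List.dedup xs) x := by
  simp [PySem.List.dedup_eq_ofList, PySem.Set.ofList, List.foldl_append]

-- the distinct characters in first-occurrence order are strictly increasing in first index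
theorem pvDedup_pairwise_fo (l : List Char) :
    (PySem.List.dedup l).Pairwise (fun a b => pvFoN l a < pvFoN l b) := by
  induction l using List.reverseRecOn with
  | nil => simp [PySem.List.dedup]
  | append_singleton xs x ih =>
    rw [pvDedup_append_singleton]
    by_cases hx : x ∈ xs
    · have h1 : PySem.Set.add (PySem.List.dedup xs) x = PySem.List.dedup xs := by
        simp [PySem.Set.add, PySem.Set.contains, hx]
      rw [h1]
      refine ih.imp_of_mem ?_
      intro a b ha hb hab
      have ha' : a ∈ xs := (PySem.List.mem_dedup xs a).mp ha
      have hb' : b ∈ xs := (PySem.List.mem_dedup xs b).mp hb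
      rwa [pvFoN, pvFoN, pvFo_append_left [x] ha', pvFo_append_left [x] hb']
    · have h1 : PySem.Set.add (PySem.List.dedup xs) x = PySem.List.dedup xs ++ [x] := by
        simp [PySem.Set.add, PySem.Set.contains, hx]
      rw [h1]
      rw [List.pairwise_append]
      refine ⟨?_, by simp, ?_⟩
      · refine ih.imp_of_mem ?_
        intro a b ha hb hab
        have ha' : a ∈ xs := (PySem.List.mem_dedup xs a).mp ha
        have hb' : b ∈ xs := (PySem.List.mem_dedup xs b).mp hb
        rwa [pvFoN, pvFoN, pvFo_append_left [x] ha', pvFo_append_left [x] hb']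
      · intro a ha b hb
        have hbx : b = x := by simpa using hb
        rw [hbx]
        have ha' : a ∈ xs := (PySem.List.mem_dedup xs a).mp ha
        have h2 : pvFoN (xs ++ [x]) a = pvFoN xs a := by
          rw [pvFoN, pvFoN, pvFo_append_left [x] ha']
        have h3 : pvFoN (xs ++ [x]) x = xs.length := by
          rw [pvFoN, pvFo_append_right [x] hx]
          simp [pvFo]
        rw [h2, h3]
        calc pvFoN xs a < (xs.length : Int) := pvFoN_lt_length ha'
          _ = _ := rfl

theorem pvIvs_pairwise (l : List Char) :
    (pvIvs l).Pairwise (fun a b => a.1 < b.1) := by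
  refine List.Pairwise.map _ ?_ (pvDedup_pairwise_fo l)
  intro a b hab
  exact hab

theorem pvTables_fst_getD {l : List Char} {c : Char} (h : c ∈ l) :
    (solveAltTables l).1.getD c 0 = pvFoN l c := by
  obtain ⟨j, hj⟩ := pvFo_isSome h
  rw [PySem.Dict.getD_eq_get?_getD]
  unfold solveAltTables
  rw [pvTables_fst]
  simp [PySem.Dict.contains_empty, hj, pvFoN]

theorem pvTables_snd_getD {l : List Char} {c : Char} (h : c ∈ l) :
    (solveAltTables l).2.getD c 0 = pvLoN l c := by
  obtain ⟨j, hj⟩ := pvLo_isSome h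
  rw [PySem.Dict.getD_eq_get?_getD]
  unfold solveAltTables
  rw [pvTables_snd]
  simp [hj, pvLoN]

theorem pvTables_keys_dedup (l : List Char) :
    (solveAltTables l).1.keys = PySem.List.dedup l := by
  unfold solveAltTables
  rw [pvTables_keys]
  simp [PySem.Dict.keys_empty, PySem.List.dedup_eq_ofList, PySem.Set.ofList, PySem.Set.update]

theorem solve_alt_eq_pvBCore (s : String) : solve_alt s = pvBCore s.toList := by
  have hmap : ((solveAltTables s.toList).1.keys.map
      (fun c => ((solveAltTables s.toList).1.getD c 0, (solveAltTables s.toList).2.getD c 0)))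
      = pvIvs s.toList := by
    rw [pvTables_keys_dedup, pvIvs]
    apply List.map_congr_left
    intro c hc
    have hcl : c ∈ s.toList := (PySem.List.mem_dedup _ c).mp hc
    rw [pvTables_fst_getD hcl, pvTables_snd_getD hcl]
  have hsorted : PySem.List.sorted
      ((solveAltTables s.toList).1.keys.map
        (fun c => ((solveAltTables s.toList).1.getD c 0, (solveAltTables s.toList).2.getD c 0)))
      (fun iv => iv.1) false = pvIvs s.toList := by
    rw [hmap]
    exact PySem.List.sorted_eq_of_perm_of_pairwise_lt _ _ _ (List.Perm.refl _) (pvIvs_pairwise _)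
  unfold solve_alt
  simp only []
  rw [hsorted]
  cases h : pvIvs s.toList with
  | nil => simp [pvBCore, h]
  | cons iv rest => simp [pvBCore, h]

-- a prefix of length k that shares no character with the rest
def pvSplittable (l : List Char) (k : Nat) : Prop := ∀ c ∈ l.take k, c ∉ l.drop k

theorem pvReach_of_not_splittable {l : List Char} {m : Nat} (h : ¬ pvSplittable l m) :
    ∃ (i : Nat) (c : Char), i < m ∧ l[i]? = some c ∧ (m : Int) ≤ pvLoN l c := by
  unfold pvSplittable at h
  push_neg at h
  obtain ⟨c, hc1, hc2⟩ := h
  obtain ⟨i, hi, hgi⟩ := List.getElem_of_mem hc1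
  obtain ⟨i', hi', hgi'⟩ := List.getElem_of_mem hc2
  have him : i < m := lt_of_lt_of_le hi (by simp [List.length_take])
  refine ⟨i, c, him, ?_, ?_⟩
  · rw [List.getElem_take] at hgi
    exact List.getElem?_eq_some_iff.mpr ⟨by simp at hi; omega, hgi⟩
  · have h1 : m + i' < l.length := by simp [List.length_drop] at hi'; omega
    have hd : l[m + i']? = some c := by
      rw [List.getElem_drop] at hgi'
      exact List.getElem?_eq_some_iff.mpr ⟨h1, hgi'⟩
    have := pvLoN_ge_of_at hd
    omega

theorem pvLoN_lt_of_disjoint {u v : List Char} (hdisj : ∀ c ∈ u, c ∉ v) {c : Char}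
    (hc : c ∈ u) : pvLoN (u ++ v) c < u.length := by
  have hc' : c ∈ u ++ v := List.mem_append_left v hc
  obtain ⟨j, hj1, hj2⟩ := pvLoN_at hc'
  by_cases hjl : j < u.length
  · omega
  · exfalso
    have : (u ++ v)[j]? = v[j - u.length]? := List.getElem?_append_right (by omega)
    rw [this] at hj2
    exact hdisj c hc (List.mem_of_getElem? hj2)

theorem pvLoN_append_left {u v : List Char} {c : Char} (hcv : c ∉ v) :
    pvLoN (u ++ v) c = pvLoN u c := by
  rw [pvLoN, pvLo_append_left v hcv, pvLoN]

theorem pvLoN_append_right {u v : List Char} {c : Char} (hcv : c ∈ v) :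
    pvLoN (u ++ v) c = u.length + pvLoN v c := by
  obtain ⟨j, hj⟩ := pvLo_isSome hcv
  rw [pvLoN, pvLo_append_right v hcv, hj, pvLoN, hj]
  simp

theorem pvFoN_append_left {u v : List Char} {c : Char} (hcu : c ∈ u) :
    pvFoN (u ++ v) c = pvFoN u c := by
  rw [pvFoN, pvFo_append_left v hcu, pvFoN]

theorem pvFoN_append_right {u v : List Char} {c : Char} (hcu : c ∉ u) (hcv : c ∈ v) :
    pvFoN (u ++ v) c = u.length + pvFoN v c := by
  obtain ⟨j, hj⟩ := pvFo_isSome hcv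
  rw [pvFoN, pvFo_append_right v hcu, hj, pvFoN, hj]
  simp

-- A's sweep splits at a minimal separable prefix
theorem pvACore_split (u v : List Char) (hu : u ≠ [])
    (hdisj : ∀ c ∈ u, c ∉ v)
    (hmin : ∀ m : Nat, 1 ≤ m → m < u.length → ¬ pvSplittable (u ++ v) m) :
    pvACore (u ++ v) = (u.length : Int) :: pvACore v := by
  obtain ⟨u', x, rfl⟩ := (List.eq_nil_or_concat u).resolve_left hu
  simp only [List.concat_eq_append] at hu hdisj hmin ⊢
  set n := u'.length with hn
  have hx_u : x ∈ u' ++ [x] := by simp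
  have hxl : (u' ++ [x] ++ v)[n]? = some x := by
    rw [List.getElem?_append_left (by simp [hn]),
      List.getElem?_append_right (by omega)]
    simp [hn]
  set L := pvLoN (u' ++ [x] ++ v) with hL
  have hLx_ge : (n : Int) ≤ L x := pvLoN_ge_of_at hxl
  have hLlt : ∀ c ∈ u' ++ [x], L c < (n : Int) + 1 := by
    intro c hc
    have h2 : pvLoN ((u' ++ [x]) ++ v) c < ((u' ++ [x]).length : Int) :=
      pvLoN_lt_of_disjoint hdisj hc
    simp only [List.length_append, List.length_cons, List.length_nil] at h2
    rw [← hL] at h2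
    push_cast at h2 ⊢
    omega
  have hrm_le : pvRm L 0 u' ≤ (n : Int) :=
    pvRm_le L (by positivity) (fun c hc => by
      have := hLlt c (List.mem_append_left _ hc); omega)
  have hLx_le : L x ≤ (n : Int) := by have := hLlt x hx_u; omega
  have hLx : L x = (n : Int) := le_antisymm hLx_le hLx_ge
  have henum : PySem.List.enumerate (u' ++ [x] ++ v) 0 =
      PySem.List.enumerate u' 0 ++
        (((n : Int), x) :: PySem.List.enumerate v ((n : Int) + 1)) := by
    rw [List.append_assoc, List.singleton_append, PySem.List.enumerate_append,
      PySem.List.enumerate_cons]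
    norm_num [hn]
  have hrun : ∀ (j : Nat), j < u'.length → ((0 : Int) + (j : Int)) < pvRm L 0 (u'.take (j + 1)) := by
    intro j hj
    obtain ⟨i, c, hi, hic, hge⟩ := pvReach_of_not_splittable
      (hmin (j + 1) (by omega) (by simp [hn]; omega))
    have hiu : i < u'.length := by omega
    have hic' : u'[i]? = some c := by
      rw [List.getElem?_append_left (by simp; omega),
        List.getElem?_append_left hiu] at hic
      exact hic
    have hmem : c ∈ u'.take (j + 1) := by
      have h3 : (u'.take (j + 1))[i]? = some c := by
        rw [List.getElem?_take_of_lt (by omega)]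
        exact hic'
      exact List.mem_of_getElem? h3
    have h1 : L c ≤ pvRm L 0 (u'.take (j + 1)) := le_pvRm_of_mem L 0 hmem
    have h4 : ((j : Int) + 1) ≤ L c := by rw [hL]; push_cast at hge ⊢; omega
    omega
  have hphase1 : pvLoopA L (PySem.List.enumerate u' 0) (0, 0, []) = (0, pvRm L 0 u', []) :=
    pvLoopA_run L u' 0 0 0 [] hrun
  have hmax : max (pvRm L 0 u') (L x) = (n : Int) := by
    rw [hLx]; exact max_eq_right hrm_le
  have hshift : ∀ c ∈ v, L c = ((n : Int) + 1) + pvLoN v c := by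
    intro c hc
    rw [hL, pvLoN_append_right hc]
    simp only [List.length_append, List.length_cons, List.length_nil, hn]
    push_cast
    ring
  have hsh := pvLoopA_shift L (pvLoN v) v ((n : Int) + 1) 0 0 0 [(n : Int) + 1] hshift
  simp only [add_zero] at hsh
  have hres := pvLoopA_res (pvLoN v) (PySem.List.enumerate v 0) 0 0 [(n : Int) + 1]
  show (pvLoopA L (PySem.List.enumerate (u' ++ [x] ++ v) 0) (0, 0, [])).2.2 = _
  rw [henum, pvLoopA_append, hphase1]
  simp only [pvLoopA]
  rw [if_pos hmax.symm]
  have harg : ((n : Int) - 0 + 1) = (n : Int) + 1 := by ring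
  simp only [List.nil_append, harg]
  rw [hsh, hres]
  show [(n : Int) + 1] ++ (pvLoopA (pvLoN v) (PySem.List.enumerate v 0) (0, 0, [])).2.2 = _
  rw [pvACore]
  simp [hn]

-- interval table of a split list
theorem pvIvs_split (u v : List Char) (hdisj : ∀ c ∈ u, c ∉ v) :
    pvIvs (u ++ v) = pvIvs u ++
      (pvIvs v).map (fun q => ((u.length : Int) + q.1, (u.length : Int) + q.2)) := by
  have hdisj2 : ∀ c ∈ v, c ∉ u := fun c hc hcu => hdisj c hcu hc
  rw [pvIvs, pvDedup_append_disjoint u v hdisj2, List.map_append]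
  congr 1
  · apply List.map_congr_left
    intro c hc
    have hcu : c ∈ u := (PySem.List.mem_dedup u c).mp hc
    rw [pvFoN_append_left hcu, pvLoN_append_left (hdisj c hcu)]
  · rw [pvIvs, List.map_map]
    apply List.map_congr_left
    intro c hc
    have hcv : c ∈ v := (PySem.List.mem_dedup v c).mp hc
    have hcu : c ∉ u := hdisj2 c hcv
    simp only [Function.comp]
    rw [pvFoN_append_right hcu hcv, pvLoN_append_right hcv]

theorem pvIvs_nil : pvIvs ([] : List Char) = [] := by
  simp [pvIvs, PySem.List.dedup_eq_ofList, PySem.Set.ofList]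

theorem pvBCore_nil : pvBCore ([] : List Char) = [] := by
  rw [pvBCore]
  simp [pvIvs_nil]

-- B's interval merge splits at a minimal separable prefix
theorem pvBCore_split (u v : List Char) (hu : u ≠ [])
    (hdisj : ∀ c ∈ u, c ∉ v)
    (hmin : ∀ m : Nat, 1 ≤ m → m < u.length → ¬ pvSplittable (u ++ v) m) :
    pvBCore (u ++ v) = (u.length : Int) :: pvBCore v := by
  obtain ⟨x, u₀, rfl⟩ := List.exists_cons_of_ne_nil hu
  obtain ⟨t, ht⟩ := pvDedup_cons x u₀
  set g : Char → Int × Int := fun c => (pvFoN (x :: u₀) c, pvLoN (x :: u₀) c) with hg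
  set ce0 : Int := pvLoN (x :: u₀) x with hce0
  have hivsu : pvIvs (x :: u₀) = ((0 : Int), ce0) :: t.map g := by
    rw [pvIvs, ht, List.map_cons]
    congr 2
    exact pvFoN_cons_self x u₀
  have hpw := pvDedup_pairwise_fo (x :: u₀)
  rw [ht] at hpw
  have hpw1 : ∀ b ∈ t, pvFoN (x :: u₀) x < pvFoN (x :: u₀) b := (List.pairwise_cons.mp hpw).1
  have hpwt : t.Pairwise (fun a b => pvFoN (x :: u₀) a < pvFoN (x :: u₀) b) :=
    (List.pairwise_cons.mp hpw).2
  have hmemt : ∀ c ∈ t, c ∈ x :: u₀ := fun c hc =>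
    (PySem.List.mem_dedup _ c).mp (ht ▸ List.mem_cons_of_mem x hc)
  -- phase-1 hypothesis: within u no merge boundary is crossed
  have hrunM : ∀ (j : Nat), j < (t.map g).length →
      ((t.map g)[j]!).1 ≤ pvRmM ce0 ((t.map g).take j) := by
    intro j hj
    have hjt : j < t.length := by simpa using hj
    have hgj : (t.map g)[j]! = g t[j] := by
      rw [getElem!_pos _ j hj, List.getElem_map]
    rw [hgj]
    by_contra hlt
    push_neg at hlt
    have hct : t[j] ∈ t := List.getElem_mem hjt
    have hcu : t[j] ∈ x :: u₀ := hmemt _ hct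
    obtain ⟨m, hm⟩ := pvFo_isSome hcu
    have hfoc : pvFoN (x :: u₀) t[j] = (m : Int) := by simp [pvFoN, hm]
    have h0 : pvFoN (x :: u₀) x = 0 := pvFoN_cons_self x u₀
    have hm1 : 1 ≤ m := by
      have := hpw1 _ hct
      rw [h0, hfoc] at this
      exact_mod_cast this
    have hmlen : m < (x :: u₀).length := by
      have := pvFoN_lt_length hcu
      rw [hfoc] at this
      exact_mod_cast this
    have hmlen' : m < u₀.length + 1 := by simpa using hmlen
    apply hmin m hm1 hmlen
    intro d hd1 hd2
    obtain ⟨i, hi, hgi⟩ := List.getElem_of_mem hd1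
    have him : i < m := lt_of_lt_of_le hi (by simp [List.length_take])
    have hiu : i < (x :: u₀).length := by omega
    have hdu_at : (x :: u₀)[i]? = some d := by
      rw [List.getElem_take] at hgi
      have h5 : ((x :: u₀) ++ v)[i]? = some d :=
        List.getElem?_eq_some_iff.mpr ⟨by simp only [List.length_append, List.length_cons]; omega, hgi⟩
      rwa [List.getElem?_append_left hiu] at h5
    have hdu : d ∈ x :: u₀ := List.mem_of_getElem? hdu_at
    have hfo_le : pvFoN (x :: u₀) d ≤ (i : Int) := pvFoN_le_of_at hdu_at
    have hdd : d ∈ x :: t := ht ▸ (PySem.List.mem_dedup _ d).mpr hdu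
    have hlo_le : pvLoN (x :: u₀) d ≤ pvRmM ce0 ((t.map g).take j) := by
      rcases List.mem_cons.mp hdd with rfl | hdt
      · exact le_pvRmM_base _ _
      · obtain ⟨i', hi', hgi'⟩ := List.getElem_of_mem hdt
        have hij : i' < j := by
          rcases Nat.lt_or_ge i' j with hlt' | hge'
          · exact hlt'
          · exfalso
            rcases Nat.eq_or_lt_of_le hge' with heq | hlt''
            · have hd_eq : d = t[j] := by rw [← hgi']; congr 1; omega
              rw [hd_eq, hfoc] at hfo_le
              omega
            · have h6 := (List.pairwise_iff_getElem.mp hpwt) j i' hjt hi' hlt''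
              simp only [] at h6
              rw [hgi'] at h6
              rw [hfoc] at h6
              omega
        have h7 : g d ∈ (t.map g).take j := by
          have h8 : ((t.map g).take j)[i']? = some (g d) := by
            rw [List.getElem?_take_of_lt hij, List.getElem?_map,
              List.getElem?_eq_getElem hi', hgi']
            rfl
          exact List.mem_of_getElem? h8
        have := le_pvRmM_of_mem ce0 h7
        simpa [hg] using this
    have hlo_lt : pvLoN ((x :: u₀) ++ v) d < (m : Int) := by
      rw [pvLoN_append_left (hdisj d hdu)]
      have hgj1 : (g t[j]).1 = pvFoN (x :: u₀) t[j] := rfl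
      rw [hgj1, hfoc] at hlt
      omega
    obtain ⟨i2, hi2, hgi2⟩ := List.getElem_of_mem hd2
    have h9 : ((x :: u₀) ++ v)[m + i2]? = some d := by
      rw [List.getElem_drop] at hgi2
      refine List.getElem?_eq_some_iff.mpr ⟨?_, hgi2⟩
      simp only [List.length_drop] at hi2
      omega
    have := pvLoN_ge_of_at h9
    push_cast at this
    omega
  have hrunM' : ∀ (j : Nat) (hj : j < (t.map g).length),
      (((t.map g)[j]).1 ≤ pvRmM ce0 ((t.map g).take j)) := by
    intro j hj
    have := hrunM j hj
    rwa [getElem!_pos _ j hj] at this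
  have hphase1 : solveAltMergeLoop (t.map g) 0 ce0 [] =
      (0, pvRmM ce0 (t.map g), []) := pvMerge_run (t.map g) 0 ce0 [] hrunM'
  have hNat1 : 1 ≤ (x :: u₀).length := by simp
  have hce : pvRmM ce0 (t.map g) = ((x :: u₀).length : Int) - 1 := by
    apply le_antisymm
    · apply pvRmM_le
      · have := pvLoN_lt_length (List.mem_cons_self (a := x) (l := u₀))
        rw [hce0]
        omega
      · intro q hq
        obtain ⟨c, hcmem, rfl⟩ := List.mem_map.mp hq
        have := pvLoN_lt_length (hmemt c hcmem)
        simp only [hg]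
        omega
    · have hNm : (x :: u₀).length - 1 < (x :: u₀).length := by omega
      have hy_at : (x :: u₀)[(x :: u₀).length - 1]? = some ((x :: u₀)[(x :: u₀).length - 1]) :=
        List.getElem?_eq_getElem hNm
      have hy_ge := pvLoN_ge_of_at hy_at
      have hy_mem : (x :: u₀)[(x :: u₀).length - 1] ∈ x :: t :=
        ht ▸ (PySem.List.mem_dedup _ _).mpr (List.getElem_mem hNm)
      have hcast : (((x :: u₀).length - 1 : Nat) : Int) = ((x :: u₀).length : Int) - 1 := by
        omega
      rcases List.mem_cons.mp hy_mem with hyx | hyt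
      · rw [hyx] at hy_ge
        have hbase := le_pvRmM_base ce0 (t.map g)
        omega
      · have h10 : pvLoN (x :: u₀) ((x :: u₀)[(x :: u₀).length - 1]) ≤
            pvRmM ce0 (t.map g) := le_pvRmM_of_mem ce0 (List.mem_map_of_mem (f := g) hyt)
        omega
  cases v with
  | nil =>
    rw [List.append_nil, pvBCore, hivsu]
    simp only [pvBCore_nil]
    rw [hphase1, hce]
    norm_num
  | cons y v₀ =>
    obtain ⟨t', ht'⟩ := pvDedup_cons y v₀
    set g' : Char → Int × Int := fun c => (pvFoN (y :: v₀) c, pvLoN (y :: v₀) c) with hg'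
    have hivsv : pvIvs (y :: v₀) = ((0 : Int), pvLoN (y :: v₀) y) :: t'.map g' := by
      rw [pvIvs, ht', List.map_cons]
      congr 2
      exact pvFoN_cons_self y v₀
    set N : Int := ((x :: u₀).length : Int) with hN
    have hNpos : 1 ≤ N := by rw [hN]; exact_mod_cast hNat1
    rw [pvBCore, pvIvs_split _ _ hdisj, hivsu, hivsv]
    simp only [List.map_cons, List.cons_append]
    rw [pvMerge_append, hphase1, hce]
    simp only [solveAltMergeLoop]
    rw [if_pos (by rw [← hN]; omega)]
    simp only [List.nil_append]
    have harg : N - 1 - 0 + 1 = N := by ring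
    rw [← hN, harg]
    have hsh := pvMerge_shift (t'.map g') N 0 (pvLoN (y :: v₀) y) [N]
    rw [hsh]
    have hres := pvMerge_res (t'.map g') 0 (pvLoN (y :: v₀) y) [N]
    rw [hres]
    rw [pvBCore, hivsv]
    simp only []
    simp

theorem pvACore_nil : pvACore ([] : List Char) = [] := by
  simp [pvACore, pvLoopA, PySem.List.enumerate_nil]

theorem pvCore_eq_bounded : ∀ (n : Nat) (l : List Char), l.length ≤ n → pvACore l = pvBCore l := by
  intro n
  induction n with
  | zero =>
    intro l hl
    have : l = [] := List.length_eq_zero_iff.mp (Nat.le_zero.mp hl)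
    rw [this, pvACore_nil, pvBCore_nil]
  | succ n ih =>
    intro l hl
    cases l with
    | nil => rw [pvACore_nil, pvBCore_nil]
    | cons a l₀ =>
      haveI : DecidablePred (fun m => 1 ≤ m ∧ pvSplittable (a :: l₀) m) := fun m => by
        unfold pvSplittable; infer_instance
      have hexists : ∃ m, 1 ≤ m ∧ pvSplittable (a :: l₀) m :=
        ⟨(a :: l₀).length, by simp, fun c hc hc2 => by simp [List.drop_length] at hc2⟩
      set k := Nat.find hexists with hk
      have hkspec := Nat.find_spec hexists
      have hkle : k ≤ (a :: l₀).length := Nat.find_min' hexists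
        ⟨by simp, fun c hc hc2 => by simp [List.drop_length] at hc2⟩
      have hmin : ∀ m, m < k → ¬ (1 ≤ m ∧ pvSplittable (a :: l₀) m) := fun m hm =>
        Nat.find_min hexists hm
      have hsplit : (a :: l₀) = (a :: l₀).take k ++ (a :: l₀).drop k :=
        (List.take_append_drop k _).symm
      have hulen : ((a :: l₀).take k).length = k := by
        simp only [List.length_take]
        omega
      have hu : (a :: l₀).take k ≠ [] := by
        intro h
        rw [h] at hulen
        simp at hulen
        omega
      have hdisj : ∀ c ∈ (a :: l₀).take k, c ∉ (a :: l₀).drop k := hkspec.2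
      have hmin' : ∀ m, 1 ≤ m → m < ((a :: l₀).take k).length →
          ¬ pvSplittable ((a :: l₀).take k ++ (a :: l₀).drop k) m := by
        intro m h1 h2
        rw [← hsplit]
        exact fun hs => hmin m (by omega) ⟨h1, hs⟩
      have hk1 : 1 ≤ k := hkspec.1
      have hvlen : ((a :: l₀).drop k).length ≤ n := by
        have hlen : (a :: l₀).length = l₀.length + 1 := by simp
        simp only [List.length_drop]
        omega
      calc pvACore (a :: l₀) = pvACore ((a :: l₀).take k ++ (a :: l₀).drop k) := by
            rw [← hsplit]
        _ = (((a :: l₀).take k).length : Int) :: pvACore ((a :: l₀).drop k) :=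
            pvACore_split _ _ hu hdisj hmin'
        _ = (((a :: l₀).take k).length : Int) :: pvBCore ((a :: l₀).drop k) := by
            rw [ih _ hvlen]
        _ = pvBCore ((a :: l₀).take k ++ (a :: l₀).drop k) :=
            (pvBCore_split _ _ hu hdisj hmin').symm
        _ = pvBCore (a :: l₀) := by rw [← hsplit]

theorem pvCore_eq (l : List Char) : pvACore l = pvBCore l :=
  pvCore_eq_bounded l.length l le_rfl


-- ===== VERDICT (by name: the statement is the Claim_ definition above) =====
theorem solve_spec : Claim_equal_solve := by
  unfold Claim_equal_solve
  intro s _hdom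
  unfold Spec_solve
  rw [solve_eq_pvACore, solve_alt_eq_pvBCore, pvCore_eq]
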